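-- pv_equiv track=rewrite | github.com/dankinsoid/ai-memory | plugins/ai-memory/hooks/scripts/rules-plan-inject.py | _content_first_line
-- ===== SOURCE A (Python) =====
-- def _content_first_line(content: str) -> str:
--     """Extract the first non-front-matter non-empty line from content."""
--     in_fm = False
--     for i, line in enumerate(content.splitlines()):
--         if i == 0 and line.strip() == "---":
--             in_fm = True
--             continue
--         if in_fm:
--             if line.strip() == "---":
--                 in_fm = False
--             continue
--         stripped = line.strip()
--         if stripped:
--             return stripped
--     return ""
-- ===== SOURCE B (Python) =====
-- def _content_first_line(content: str) -> str:
--     """Extract the first non-front-matter non-empty line from content."""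
--     lines = content.splitlines()
--     start = 0
--     if lines and lines[0].strip() == "---":
--         close = next((j for j in range(1, len(lines)) if lines[j].strip() == "---"), None)
--         if close is None:
--             return ""
--         start = close + 1
--     for line in lines[start:]:
--         s = line.strip()
--         if s:
--             return s
--     return ""
-- ===== Notes on version B (the rewrite author's own statement) =====
-- stated objective: alternative
-- what changed: Replaces A's single stateful loop (in_fm flag toggled while enumerating) with two separate phases: first locate the closing front-matter delimiter (or return '' if the opened front matter never closes), then a plain scan of the remaining lines for the first non-empty stripped line.
import Mathlib
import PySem

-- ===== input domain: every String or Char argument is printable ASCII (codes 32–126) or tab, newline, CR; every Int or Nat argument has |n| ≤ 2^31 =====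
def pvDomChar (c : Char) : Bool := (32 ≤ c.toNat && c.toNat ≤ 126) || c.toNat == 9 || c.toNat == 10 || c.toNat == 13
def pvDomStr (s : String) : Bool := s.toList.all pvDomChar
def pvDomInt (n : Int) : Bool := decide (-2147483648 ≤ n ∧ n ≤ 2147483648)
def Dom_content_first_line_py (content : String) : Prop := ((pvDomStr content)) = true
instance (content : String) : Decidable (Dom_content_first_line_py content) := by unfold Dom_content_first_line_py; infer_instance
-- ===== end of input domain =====

-- B replaces A's single stateful loop (in_fm flag) with a delimiter-finding phase followed by a
-- separate content scan; same behaviour, stated as exact equivalence (objective: alternative).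

-- ===== PORT A =====
-- A's for-loop over enumerate(content.splitlines()) with the in_fm flag, early return = stopping.
def pvALoop : List (Int × String) → Bool → String
  | [], _ => ""
  | (i, line) :: rest, in_fm =>
    if i = 0 ∧ PySem.Str.strip line = "---" then pvALoop rest true
    else if in_fm then
      (if PySem.Str.strip line = "---" then pvALoop rest false else pvALoop rest true)
    else
      let stripped := PySem.Str.strip line
      if stripped ≠ "" then stripped else pvALoop rest in_fm

def content_first_line_py (content : String) : String :=
  pvALoop (PySem.List.enumerate (PySem.Str.splitlines content) 0) false

-- ===== PORT B =====
-- scan lines[start:] for the first non-empty stripped line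
def pvScan : List String → String
  | [] => ""
  | l :: rest => let s := PySem.Str.strip l; if s = "" then pvScan rest else s

-- find the closing '---' delimiter: returns the suffix of lines after it, none if never closed
def pvAfterClose : List String → Option (List String)
  | [] => none
  | l :: rest => if PySem.Str.strip l = "---" then some rest else pvAfterClose rest

def content_first_line_py_alt (content : String) : String :=
  match PySem.Str.splitlines content with
  | [] => ""
  | l0 :: rest =>
    if PySem.Str.strip l0 = "---" then
      match pvAfterClose rest with
      | some suf => pvScan suf
      | none => ""
    else pvScan (l0 :: rest)

-- ===== PRECONDITION & SPEC =====
def Spec_content_first_line_py (content : String) (out : String) : Prop := out = content_first_line_py_alt content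
instance (content : String) (out : String) : Decidable (Spec_content_first_line_py content out) := by unfold Spec_content_first_line_py; infer_instance

-- ===== CLAIM (what is proved, stated in full; the proofs are below) =====
def Claim_equal_content_first_line_py : Prop := ∀ (content : String), Dom_content_first_line_py content → Spec_content_first_line_py content (content_first_line_py content)

-- ===== LEMMAS AND PROOFS =====

theorem pvALoop_false (rest : List String) (k : Int) (hk : 1 ≤ k) :
    pvALoop (PySem.List.enumerate rest k) false = pvScan rest := by
  induction rest generalizing k with
  | nil => simp [PySem.List.enumerate_nil, pvALoop, pvScan]
  | cons l rs ih =>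
    rw [PySem.List.enumerate_cons]
    have hne : ¬ (k = 0 ∧ PySem.Str.strip l = "---") := by
      rintro ⟨h0, -⟩; omega
    simp only [pvALoop, pvScan, if_neg hne]
    by_cases hs : PySem.Str.strip l = ""
    · simp [hs, ih (k+1) (by omega)]
    · simp [hs]

theorem pvALoop_true (rest : List String) (k : Int) (hk : 1 ≤ k) :
    pvALoop (PySem.List.enumerate rest k) true =
      (match pvAfterClose rest with
       | some suf => pvScan suf
       | none => "") := by
  induction rest generalizing k with
  | nil => simp [PySem.List.enumerate_nil, pvALoop, pvAfterClose]
  | cons l rs ih =>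
    rw [PySem.List.enumerate_cons]
    have hne : ¬ (k = 0 ∧ PySem.Str.strip l = "---") := by
      rintro ⟨h0, -⟩; omega
    by_cases hd : PySem.Str.strip l = "---"
    · simp only [pvALoop, pvAfterClose, if_neg hne, if_pos hd]
      exact pvALoop_false rs (k+1) (by omega)
    · simp only [pvALoop, pvAfterClose, if_neg hne, if_neg hd]
      exact ih (k+1) (by omega)

-- ===== VERDICT (by name: the statement is the Claim_ definition above) =====
theorem content_first_line_py_spec : Claim_equal_content_first_line_py := by
  intro content _
  unfold Spec_content_first_line_py content_first_line_py content_first_line_py_alt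
  cases h : PySem.Str.splitlines content with
  | nil => simp [PySem.List.enumerate_nil, pvALoop]
  | cons l0 rest =>
    rw [PySem.List.enumerate_cons]
    by_cases hd : PySem.Str.strip l0 = "---"
    · simp only [pvALoop, pvScan, hd]
      simpa using pvALoop_true rest 1 le_rfl
    · simp only [pvALoop, pvScan, if_neg hd]
      by_cases hs : PySem.Str.strip l0 = ""
      · simp [hs, pvALoop_false rest 1 le_rfl]
      · simp [hs, hd]
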